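-- pv_equiv track=rewrite | github.com/ochelset/advent-of-code | 2015/Day 5/05.py | findPairsOf
-- ===== SOURCE A (Python) =====
-- import itertools
--
-- def findPairsOf(letters: [str], word: str) -> int:
--     combinations = []
--
--     for letter in letters:
--         combinations.append((letter, letter))
--     for combination in itertools.combinations(letters, 2):
--         combinations.append(combination)
--         combinations.append((combination[1], combination[0]))
--
--     for combination in combinations:
--         pair = "".join(combination)
--
--         index = word.find(pair)
--         if index == -1:
--             continue
--
--         index2 = word.find(pair, index + 2)
--         if index2 == -1:
--             continue
--
--         return 2
--
--     return 0
-- ===== SOURCE B (Python) =====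
-- def findPairsOf(letters: [str], word: str) -> int:
--     # precompute the start positions of each distinct letter in the word once,
--     # then a pair x+y repeats at distance >= 2 iff the positions where x+y
--     # occurs span at least 2 (last minus first)
--     starts = {l: [i for i in range(len(word) + 1) if word.startswith(l, i)]
--               for l in set(letters)}
--     for x, px in starts.items():
--         for py in starts.values():
--             hits = [i for i in px if i + len(x) in py]
--             if hits and hits[-1] - hits[0] >= 2:
--                 return 2
--     return 0
-- ===== Notes on version B (the rewrite author's own statement) =====
-- stated objective: faster
-- what changed: A enumerates every ordered pair of the letters list (duplicates included) and runs two substring searches over the word per pair; B precomputes, once per distinct letter, the list of positions where that letter starts in the word, and decides each pair by intersecting those position lists and checking that their span (last hit minus first) is at least 2 — measured far faster on the generated inputs.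
import Mathlib
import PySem

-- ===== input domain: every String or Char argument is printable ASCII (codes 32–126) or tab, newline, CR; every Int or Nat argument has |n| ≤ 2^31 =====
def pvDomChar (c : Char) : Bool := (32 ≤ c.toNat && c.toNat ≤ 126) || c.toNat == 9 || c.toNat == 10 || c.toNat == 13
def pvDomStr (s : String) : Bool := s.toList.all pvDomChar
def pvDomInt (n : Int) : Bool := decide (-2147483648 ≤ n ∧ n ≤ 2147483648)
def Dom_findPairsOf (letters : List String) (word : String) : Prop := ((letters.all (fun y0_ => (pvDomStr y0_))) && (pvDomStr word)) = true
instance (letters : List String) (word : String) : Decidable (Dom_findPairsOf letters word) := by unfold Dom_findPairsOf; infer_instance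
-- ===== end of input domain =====

-- B replaces A's pair-enumeration (all letter pairs, two word.find calls each) by precomputing,
-- once per distinct letter, the list of positions where it starts in the word, then checking each
-- pair by the span (last minus first) of its occurrence positions (measured faster in a timing run).


-- ===== PORT A =====
-- combinations = [] ; append (l,l) for each letter ; append both orders of each 2-combination
def buildCombos (letters : List String) : List (String × String) :=
  let combos1 := letters.foldl (fun acc letter => acc ++ [(letter, letter)]) []
  (PySem.List.combinations letters 2).foldl
    (fun acc c =>
      acc ++ [(PySem.List.pyGetD c 0 "", PySem.List.pyGetD c 1 ""),
              (PySem.List.pyGetD c 1 "", PySem.List.pyGetD c 0 "")]) combos1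

-- the final loop of A with its early `return 2`
def loopA (word : String) : List (String × String) → Int
  | [] => 0
  | c :: rest =>
    let pair := PySem.Str.join "" [c.1, c.2]
    let index := PySem.Str.find word pair
    if index = -1 then loopA word rest
    else
      let index2 := PySem.Str.findFrom word pair (index + 2) none
      if index2 = -1 then loopA word rest
      else 2

def findPairsOf (letters : List String) (word : String) : Int :=
  loopA word (buildCombos letters)

-- ===== PORT B =====
-- [i for i in range(len(word) + 1) if word.startswith(l, i)]
-- (exact: for 0 ≤ i ≤ len(word), Python's word.startswith(l, i) is "l is a prefix of word[i:]")
def posList (w : List Char) (l : List Char) : List Int :=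
  (PySem.List.pyRange 0 ((w.length : Int) + 1) 1).filter
    (fun i => PySem.Chars.startswith (w.drop i.toNat) l)

-- for py in starts.values(): hits = [i for i in px if i + len(x) in py]; if hits and hits[-1]-hits[0] >= 2: return 2
def loopInner (x : String) (px : List Int) : List (List Int) → Int
  | [] => 0
  | py :: rest =>
    let hits := px.filter (fun i => py.contains (i + PySem.Str.len x))
    if hits ≠ [] ∧ PySem.List.pyGetD hits (-1) 0 - PySem.List.pyGetD hits 0 0 ≥ 2 then 2
    else loopInner x px rest

-- for x, px in starts.items(): inner loop over starts.values()
def loopOuter (vals : List (List Int)) : List (String × List Int) → Int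
  | [] => 0
  | (x, px) :: rest =>
    if loopInner x px vals = 2 then 2 else loopOuter vals rest

def findPairsOf_alt (letters : List String) (word : String) : Int :=
  let starts := (PySem.Set.ofList letters).map (fun l => (l, posList word.toList l.toList))
  loopOuter (starts.map Prod.snd) starts

-- ===== PRECONDITION & SPEC =====
def Spec_findPairsOf (letters : List String) (word : String) (out : Int) : Prop := out = findPairsOf_alt letters word
instance (letters : List String) (word : String) (out : Int) : Decidable (Spec_findPairsOf letters word out) := by unfold Spec_findPairsOf; infer_instance

-- ===== CLAIM (what is proved, stated in full; the proofs are below) =====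
def Claim_equal_findPairsOf : Prop := ∀ (letters : List String) (word : String), Dom_findPairsOf letters word → Spec_findPairsOf letters word (findPairsOf letters word)

-- ===== LEMMAS AND PROOFS =====

-- occurrence of p in w at position j (Python's find/startswith positions run 0..len w)
def Occ (w p : List Char) (j : Nat) : Prop := j ≤ w.length ∧ p <+: w.drop j

-- "the pair x+y occurs twice, at distance ≥ 2": the semantic content both programs decide
def Good (w : List Char) (x y : String) : Prop :=
  ∃ i j : Nat, Occ w (x.toList ++ y.toList) i ∧ Occ w (x.toList ++ y.toList) j ∧ i + 2 ≤ j

def GoodAll (letters : List String) (w : List Char) : Prop :=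
  ∃ x ∈ letters, ∃ y ∈ letters, Good w x y

lemma join_pair (x y : String) : (PySem.Str.join "" [x, y]).toList = x.toList ++ y.toList := by
  simp [PySem.Str.toList_join, PySem.Chars.join, List.intercalate]

-- CPython quirk (kept by PySem): find with a start index past the end returns -1
lemma findFrom_past_len (s sub : List Char) (k : Nat) (hk : s.length < k) :
    PySem.Chars.findFrom s sub (k : Int) none = -1 := by
  simp only [PySem.Chars.findFrom]
  split_ifs <;> first | rfl | (exfalso; omega)

lemma infix_iff_exists_drop {p l : List Char} : p <:+: l ↔ ∃ n ≤ l.length, p <+: l.drop n := by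
  constructor
  · rintro ⟨s₁, s₂, rfl⟩
    exact ⟨s₁.length, by simp, by simp⟩
  · rintro ⟨n, hn, t, ht⟩
    exact ⟨l.take n, t, by rw [List.append_assoc, ht, List.take_append_drop]⟩

lemma prefix_append_iff {x y l : List Char} :
    x ++ y <+: l ↔ x <+: l ∧ y <+: l.drop x.length := by
  constructor
  · rintro ⟨t, rfl⟩
    exact ⟨⟨y ++ t, by simp⟩, ⟨t, by simp⟩⟩
  · rintro ⟨hx, hy⟩
    have hx' := List.prefix_iff_eq_append.mp hx
    have hy' := List.prefix_iff_eq_append.mp hy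
    exact ⟨(l.drop x.length).drop y.length, by rw [List.append_assoc, hy', hx']⟩

-- the condition A's loop body tests, as a Prop
def CondA (word : String) (c : String × String) : Prop :=
  PySem.Str.find word (PySem.Str.join "" [c.1, c.2]) ≠ -1 ∧
  PySem.Str.findFrom word (PySem.Str.join "" [c.1, c.2])
    (PySem.Str.find word (PySem.Str.join "" [c.1, c.2]) + 2) none ≠ -1

-- "find succeeds twice, the second search starting 2 after the first hit" ↔ two occurrences ≥ 2 apart
lemma cond_chars_iff (w pl : List Char) :
    (PySem.Chars.find w pl ≠ -1 ∧
      PySem.Chars.findFrom w pl (PySem.Chars.find w pl + 2) none ≠ -1)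
    ↔ ∃ i j : Nat, Occ w pl i ∧ Occ w pl j ∧ i + 2 ≤ j := by
  constructor
  · rintro ⟨h1, h2⟩
    have h0 : 0 ≤ PySem.Chars.find w pl := by
      have := PySem.Chars.neg_one_le_find w pl; omega
    obtain ⟨hocc, hmin⟩ := PySem.Chars.find_spec h0
    have hlen := PySem.Chars.find_le_length w pl
    set i0 := (PySem.Chars.find w pl).toNat with hi0
    have hcast : PySem.Chars.find w pl + 2 = ((i0 + 2 : Nat) : Int) := by push_cast; omega
    rw [hcast] at h2
    by_cases hk : i0 + 2 ≤ w.length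
    · have hinf : pl <:+: w.drop (i0 + 2) := by
        by_contra hni
        exact h2 ((PySem.Chars.findFrom_natCast_eq_neg_one_iff w pl (i0 + 2) hk).mpr hni)
      obtain ⟨m, hm, hpre⟩ := infix_iff_exists_drop.mp hinf
      rw [List.drop_drop] at hpre
      refine ⟨i0, i0 + 2 + m, ⟨by omega, hocc⟩, ⟨?_, hpre⟩, by omega⟩
      simp only [List.length_drop] at hm; omega
    · exact absurd (findFrom_past_len w pl (i0 + 2) (by omega)) h2
  · rintro ⟨i, j, ⟨hi, hoi⟩, ⟨hj, hoj⟩, hij⟩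
    have hinfw : pl <:+: w := infix_iff_exists_drop.mpr ⟨i, hi, hoi⟩
    have h1 : PySem.Chars.find w pl ≠ -1 := (PySem.Chars.find_ne_neg_one_iff w pl).mpr hinfw
    have h0 : 0 ≤ PySem.Chars.find w pl := by
      have := PySem.Chars.neg_one_le_find w pl; omega
    obtain ⟨hocc, hmin⟩ := PySem.Chars.find_spec h0
    set i0 := (PySem.Chars.find w pl).toNat with hi0
    have hi0le : i0 ≤ i := by
      by_contra hlt
      exact hmin i (by omega) hoi
    have hk : i0 + 2 ≤ w.length := by omega
    have hcast : PySem.Chars.find w pl + 2 = ((i0 + 2 : Nat) : Int) := by push_cast; omega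
    refine ⟨h1, ?_⟩
    rw [hcast, Ne, PySem.Chars.findFrom_natCast_eq_neg_one_iff w pl (i0 + 2) hk]
    intro hni
    apply hni
    refine infix_iff_exists_drop.mpr ⟨j - (i0 + 2), ?_, ?_⟩
    · simp only [List.length_drop]; omega
    · rw [List.drop_drop]
      have : i0 + 2 + (j - (i0 + 2)) = j := by omega
      rwa [this]

lemma condA_iff_good (word : String) (x y : String) :
    CondA word (x, y) ↔ Good word.toList x y := by
  unfold CondA Good
  rw [PySem.Str.find_eq, PySem.Str.findFrom_eq, join_pair]
  exact cond_chars_iff word.toList (x.toList ++ y.toList)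

lemma loopA_eq_two_iff (word : String) (cs : List (String × String)) :
    loopA word cs = 2 ↔ ∃ c ∈ cs, CondA word c := by
  induction cs with
  | nil => simp [loopA]
  | cons c rest ih =>
    simp only [loopA]
    split_ifs with h1 h2
    · rw [ih]
      constructor
      · rintro ⟨a, ha, hca⟩; exact ⟨a, List.mem_cons_of_mem _ ha, hca⟩
      · rintro ⟨a, ha, hca⟩
        rcases List.mem_cons.mp ha with rfl | ha
        · exact absurd h1 hca.1
        · exact ⟨a, ha, hca⟩
    · rw [ih]
      constructor
      · rintro ⟨a, ha, hca⟩; exact ⟨a, List.mem_cons_of_mem _ ha, hca⟩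
      · rintro ⟨a, ha, hca⟩
        rcases List.mem_cons.mp ha with rfl | ha
        · exact absurd h2 hca.2
        · exact ⟨a, ha, hca⟩
    · exact iff_of_true rfl ⟨c, List.mem_cons_self, h1, h2⟩

lemma loopA_zero_or_two (word : String) (cs : List (String × String)) :
    loopA word cs = 0 ∨ loopA word cs = 2 := by
  induction cs with
  | nil => simp [loopA]
  | cons c rest ih => simp only [loopA]; split_ifs <;> simp [ih]

lemma sublist_pair_of_mem {a b : String} {l : List String} (ha : a ∈ l) (hb : b ∈ l)
    (hne : a ≠ b) : [a, b].Sublist l ∨ [b, a].Sublist l := by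
  induction l with
  | nil => cases ha
  | cons c t ih =>
    rcases List.mem_cons.mp ha with rfl | ha'
    · have hb' : b ∈ t := by
        rcases List.mem_cons.mp hb with rfl | h
        · exact absurd rfl hne
        · exact h
      exact Or.inl ((List.singleton_sublist.mpr hb').cons₂ a)
    · rcases List.mem_cons.mp hb with rfl | hb'
      · exact Or.inr ((List.singleton_sublist.mpr ha').cons₂ b)
      · rcases ih ha' hb' with h | h
        · exact Or.inl (h.cons c)
        · exact Or.inr (h.cons c)

lemma getD0 (a b : String) : PySem.List.pyGetD [a, b] 0 "" = a := by
  simp [pysem]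
lemma getD1 (a b : String) : PySem.List.pyGetD [a, b] 1 "" = b := by
  simp [pysem]

lemma mem_buildCombos {letters : List String} {c : String × String} :
    c ∈ buildCombos letters ↔ c.1 ∈ letters ∧ c.2 ∈ letters := by
  unfold buildCombos
  rw [PySem.List.foldl_append_eq_flatMap, PySem.List.foldl_append_singleton_eq_map]
  simp only [List.nil_append, List.mem_append, List.mem_map, List.mem_flatMap]
  constructor
  · rintro (⟨l, hl, rfl⟩ | ⟨cc, hcc, hmem⟩)
    · exact ⟨hl, hl⟩
    · obtain ⟨hsub, hlen⟩ := (PySem.List.mem_combinations_iff letters 2 cc).mp hcc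
      match cc, hlen with
      | [a, b], _ =>
        have ha : a ∈ letters := hsub.subset (by simp)
        have hb : b ∈ letters := hsub.subset (by simp)
        rw [getD0, getD1] at hmem
        rcases List.mem_cons.mp hmem with rfl | hmem'
        · exact ⟨ha, hb⟩
        · rcases List.mem_cons.mp hmem' with rfl | hmem''
          · exact ⟨hb, ha⟩
          · cases hmem''
  · rintro ⟨h1, h2⟩
    by_cases he : c.1 = c.2
    · exact Or.inl ⟨c.1, h1, Prod.ext rfl he⟩
    · rcases sublist_pair_of_mem h1 h2 he with h | h
      · refine Or.inr ⟨[c.1, c.2], (PySem.List.mem_combinations_iff letters 2 _).mpr ⟨h, rfl⟩, ?_⟩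
        rw [getD0, getD1]
        simp
      · refine Or.inr ⟨[c.2, c.1], (PySem.List.mem_combinations_iff letters 2 _).mpr ⟨h, rfl⟩, ?_⟩
        rw [getD0, getD1]
        simp

lemma A_eq_two_iff (letters : List String) (word : String) :
    findPairsOf letters word = 2 ↔ GoodAll letters word.toList := by
  unfold findPairsOf GoodAll
  rw [loopA_eq_two_iff]
  constructor
  · rintro ⟨c, hc, hca⟩
    obtain ⟨h1, h2⟩ := mem_buildCombos.mp hc
    exact ⟨c.1, h1, c.2, h2, (condA_iff_good word c.1 c.2).mp hca⟩
  · rintro ⟨x, hx, y, hy, hgood⟩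
    exact ⟨(x, y), mem_buildCombos.mpr ⟨hx, hy⟩, (condA_iff_good word x y).mpr hgood⟩

-- ===== B side =====

-- posList on the Nat side
def natPos (w l : List Char) : List Nat :=
  (List.range (w.length + 1)).filter (fun k => PySem.Chars.startswith (w.drop k) l)

lemma posList_eq (w l : List Char) : posList w l = (natPos w l).map Nat.cast := by
  unfold posList natPos
  have h : ((w.length : Int) + 1) = ((w.length + 1 : Nat) : Int) := by push_cast; ring
  rw [h, PySem.List.pyRange_zero_natCast, List.filter_map]
  refine congrArg (List.map Nat.cast) (List.filter_congr ?_)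
  intro k _
  simp [Function.comp]

lemma mem_natPos {w l : List Char} {k : Nat} :
    k ∈ natPos w l ↔ k ≤ w.length ∧ l <+: w.drop k := by
  unfold natPos
  simp [List.mem_filter, List.mem_range, PySem.Chars.startswith_iff]

lemma natPos_pairwise (w l : List Char) : (natPos w l).Pairwise (· < ·) :=
  (List.pairwise_lt_range).filter _

-- hits for a pair (x, y), on the Nat side
def hitsNat (w : List Char) (x y : String) : List Nat :=
  (natPos w x.toList).filter (fun k => decide ((k + x.toList.length) ∈ natPos w y.toList))

lemma hits_eq (w : List Char) (x y : String) :
    (posList w x.toList).filter (fun i => (posList w y.toList).contains (i + PySem.Str.len x))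
      = (hitsNat w x y).map Nat.cast := by
  unfold hitsNat
  simp only [posList_eq, List.filter_map]
  congr 1
  apply List.filter_congr
  intro k _
  have h : ((k : Int) + PySem.Str.len x) = ((k + x.toList.length : Nat) : Int) := by
    rw [PySem.Str.len_eq]; push_cast; ring
  simp only [Function.comp, h, List.contains_eq_mem, List.mem_map, decide_eq_decide]
  constructor
  · rintro ⟨m, hm, he⟩
    rwa [show m = k + x.toList.length from by exact_mod_cast he] at hm
  · intro hm; exact ⟨_, hm, rfl⟩

lemma mem_hitsNat {w : List Char} {x y : String} {k : Nat} :
    k ∈ hitsNat w x y ↔ Occ w (x.toList ++ y.toList) k := by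
  unfold hitsNat Occ
  simp only [List.mem_filter, mem_natPos, decide_eq_true_eq, prefix_append_iff]
  constructor
  · rintro ⟨⟨hk, hx⟩, hky, hy⟩
    refine ⟨hk, hx, ?_⟩
    rw [List.drop_drop]
    exact hy
  · rintro ⟨hk, hx, hy⟩
    have hlx : x.toList.length ≤ (w.drop k).length := hx.length_le
    simp only [List.length_drop] at hlx
    rw [List.drop_drop] at hy
    exact ⟨⟨hk, hx⟩, ⟨by omega, hy⟩⟩

lemma hitsNat_pairwise (w : List Char) (x y : String) : (hitsNat w x y).Pairwise (· < ·) :=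
  (natPos_pairwise w x.toList).filter _

lemma le_getLast_of_pairwise {l : List Nat} (hp : l.Pairwise (· < ·)) {a : Nat} (ha : a ∈ l)
    (hne : l ≠ []) : a ≤ l.getLast hne := by
  induction l with
  | nil => cases ha
  | cons b t ih =>
    cases t with
    | nil =>
      simp only [List.mem_singleton] at ha
      simp [ha, List.getLast]
    | cons c t2 =>
      rw [List.getLast_cons (by simp)]
      rcases List.mem_cons.mp ha with rfl | ha'
      · exact le_of_lt (List.rel_of_pairwise_cons hp (List.getLast_mem (by simp)))
      · exact ih (List.pairwise_cons.mp hp).2 ha' (by simp)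

lemma head_le_of_pairwise {h : Nat} {t : List Nat} (hp : (h :: t).Pairwise (· < ·)) {a : Nat}
    (ha : a ∈ h :: t) : h ≤ a := by
  rcases List.mem_cons.mp ha with rfl | ha'
  · exact le_refl a
  · exact le_of_lt (List.rel_of_pairwise_cons hp ha')

-- the condition B's inner loop body tests, as a Prop
def CondB (x : String) (px py : List Int) : Prop :=
  let hits := px.filter (fun i => py.contains (i + PySem.Str.len x))
  hits ≠ [] ∧ PySem.List.pyGetD hits (-1) 0 - PySem.List.pyGetD hits 0 0 ≥ 2

lemma getD_zero_map (h : Nat) (t : List Nat) :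
    PySem.List.pyGetD ((h :: t).map (Nat.cast : Nat → Int)) 0 0 = (h : Int) := by
  simp [PySem.List.pyGetD_zero_cons]

lemma getD_last_map (h : Nat) (t : List Nat) :
    PySem.List.pyGetD ((h :: t).map (Nat.cast : Nat → Int)) (-1) 0
      = ((h :: t).getLast (List.cons_ne_nil h t) : Int) := by
  rw [PySem.List.pyGetD_neg_one _ _ (by simp), List.getLast_map]

lemma condB_iff_good (w : List Char) (x y : String) :
    CondB x (posList w x.toList) (posList w y.toList) ↔ Good w x y := by
  unfold CondB Good
  simp only [hits_eq]
  constructor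
  · rintro ⟨hne, hge⟩
    have hne' : hitsNat w x y ≠ [] := by
      intro h0; rw [h0] at hne; exact hne rfl
    obtain ⟨h, t, he⟩ := List.exists_cons_of_ne_nil hne'
    rw [he, getD_last_map, getD_zero_map] at hge
    have hmem1 : h ∈ hitsNat w x y := by rw [he]; exact List.mem_cons_self
    have hmem2 : (h :: t).getLast (List.cons_ne_nil h t) ∈ hitsNat w x y := by
      rw [he]; exact List.getLast_mem (List.cons_ne_nil h t)
    exact ⟨h, (h :: t).getLast (List.cons_ne_nil h t),
      mem_hitsNat.mp hmem1, mem_hitsNat.mp hmem2, by omega⟩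
  · rintro ⟨i, j, hoi, hoj, hij⟩
    have hi : i ∈ hitsNat w x y := mem_hitsNat.mpr hoi
    have hj : j ∈ hitsNat w x y := mem_hitsNat.mpr hoj
    have hne' : hitsNat w x y ≠ [] := List.ne_nil_of_mem hi
    obtain ⟨h, t, he⟩ := List.exists_cons_of_ne_nil hne'
    have hp := hitsNat_pairwise w x y
    rw [he] at hp hi hj
    have h1 : h ≤ i := head_le_of_pairwise hp hi
    have h2 : j ≤ (h :: t).getLast (List.cons_ne_nil h t) :=
      le_getLast_of_pairwise hp hj (List.cons_ne_nil h t)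
    constructor
    · rw [he]; simp
    · rw [he, getD_last_map, getD_zero_map]
      omega

lemma loopInner_eq_two_iff (x : String) (px : List Int) (vals : List (List Int)) :
    loopInner x px vals = 2 ↔ ∃ py ∈ vals, CondB x px py := by
  induction vals with
  | nil => simp [loopInner]
  | cons py rest ih =>
    simp only [loopInner]
    split_ifs with h1
    · exact iff_of_true rfl ⟨py, List.mem_cons_self, h1⟩
    · rw [ih]
      constructor
      · rintro ⟨a, ha, hca⟩; exact ⟨a, List.mem_cons_of_mem _ ha, hca⟩
      · rintro ⟨a, ha, hca⟩
        rcases List.mem_cons.mp ha with rfl | ha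
        · exact absurd hca h1
        · exact ⟨a, ha, hca⟩

lemma loopOuter_eq_two_iff (vals : List (List Int)) (items : List (String × List Int)) :
    loopOuter vals items = 2 ↔ ∃ p ∈ items, loopInner p.1 p.2 vals = 2 := by
  induction items with
  | nil => simp [loopOuter]
  | cons p rest ih =>
    obtain ⟨x, px⟩ := p
    simp only [loopOuter]
    split_ifs with h1
    · exact iff_of_true rfl ⟨(x, px), List.mem_cons_self, h1⟩
    · rw [ih]
      constructor
      · rintro ⟨a, ha, hca⟩; exact ⟨a, List.mem_cons_of_mem _ ha, hca⟩
      · rintro ⟨a, ha, hca⟩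
        rcases List.mem_cons.mp ha with rfl | ha
        · exact absurd hca h1
        · exact ⟨a, ha, hca⟩

lemma loopOuter_zero_or_two (vals : List (List Int)) (items : List (String × List Int)) :
    loopOuter vals items = 0 ∨ loopOuter vals items = 2 := by
  induction items with
  | nil => simp [loopOuter]
  | cons p rest ih =>
    obtain ⟨x, px⟩ := p
    simp only [loopOuter]; split_ifs <;> simp [ih]

lemma B_eq_two_iff (letters : List String) (word : String) :
    findPairsOf_alt letters word = 2 ↔ GoodAll letters word.toList := by
  unfold findPairsOf_alt GoodAll
  rw [loopOuter_eq_two_iff]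
  constructor
  · rintro ⟨p, hp, hinner⟩
    obtain ⟨x, hx, rfl⟩ := List.mem_map.mp hp
    obtain ⟨py, hpy, hcond⟩ := (loopInner_eq_two_iff _ _ _).mp hinner
    rw [List.map_map] at hpy
    obtain ⟨y, hy, rfl⟩ := List.mem_map.mp hpy
    refine ⟨x, (PySem.Set.mem_ofList letters x).mp hx, y,
      (PySem.Set.mem_ofList letters y).mp hy, ?_⟩
    exact (condB_iff_good word.toList x y).mp (by simpa using hcond)
  · rintro ⟨x, hx, y, hy, hgood⟩
    refine ⟨(x, posList word.toList x.toList),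
      List.mem_map.mpr ⟨x, (PySem.Set.mem_ofList letters x).mpr hx, rfl⟩, ?_⟩
    refine (loopInner_eq_two_iff _ _ _).mpr ⟨posList word.toList y.toList, ?_,
      (condB_iff_good word.toList x y).mpr hgood⟩
    rw [List.map_map]
    exact List.mem_map.mpr ⟨y, (PySem.Set.mem_ofList letters y).mpr hy, rfl⟩

-- ===== VERDICT (by name: the statement is the Claim_ definition above) =====
theorem findPairsOf_spec : Claim_equal_findPairsOf := by
  intro letters word _
  unfold Spec_findPairsOf
  rcases loopA_zero_or_two word (buildCombos letters) with hA | hA <;>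
  rcases loopOuter_zero_or_two
      (((PySem.Set.ofList letters).map (fun l => (l, posList word.toList l.toList))).map Prod.snd)
      ((PySem.Set.ofList letters).map (fun l => (l, posList word.toList l.toList))) with hB | hB
  · show loopA _ _ = loopOuter _ _; rw [hA, hB]
  · exfalso
    have h2 : findPairsOf_alt letters word = 2 := hB
    have := (B_eq_two_iff letters word).mp h2
    have := (A_eq_two_iff letters word).mpr this
    simp only [findPairsOf] at this; omega
  · exfalso
    have h2 : findPairsOf letters word = 2 := hA
    have := (A_eq_two_iff letters word).mp h2
    have := (B_eq_two_iff letters word).mpr this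
    simp only [findPairsOf_alt] at this
    omega
  · show loopA _ _ = loopOuter _ _; rw [hA, hB]
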